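-- pv_equiv track=rewrite | github.com/Vanilla1002/advent-of-code | 2025/day3/solution.py | part2
-- ===== SOURCE A (Python) =====
-- from collections import deque
--
-- def helper_function(count_positions: dict[int, deque[int]], n: int, length: int) -> int:
--     result =[]
--     current_index = -1
--     while len(result)<n:
--         found_change = False
--         l_result = len(result)
--         for key in sorted(count_positions.keys(), reverse=True):
--             while count_positions[key] and count_positions[key][0] <= current_index:
--                 count_positions[key].popleft()
--             if not count_positions[key]:
--                 continue
--             if (n - l_result)> length-count_positions[key][0]:
--                 continue
--
--             current_index = count_positions[key].popleft()
--             result.append(key)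
--             found_change = True
--             break
--         if not found_change:
--             break
--     def caclulate_score(res: list[int]) -> int:
--         score = 0
--         for index, val in enumerate(res):
--             score += val * (10 ** (n - index - 1))
--         return score
--     return caclulate_score(result)
--
-- def part2 (list1 :list[str], n :int) -> int:
--     result = 0
--
--     for bank in list1:
--         count_positions = {}
--         l = len(bank)
--         for i in range(l):
--             int_i = int(bank[i])
--             if int_i not in count_positions:
--                 count_positions[int_i] = deque()
--             count_positions[int_i].append(i)
--         result += helper_function(count_positions, n, l)
--     return result
-- ===== SOURCE B (Python) =====
-- def part2(list1, n):
--     total = 0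
--     for bank in list1:
--         l = len(bank)
--         digits = [int(c) for c in bank]
--         if l < n:
--             continue
--         start = 0
--         value = 0
--         for k in range(n):
--             window = digits[start : l - n + k + 1]
--             d = max(window)
--             value = value * 10 + d
--             start += window.index(d) + 1
--         total += value
--     return total
-- ===== Notes on version B (the rewrite author's own statement) =====
-- stated objective: simpler
-- what changed: Replaced the digit->deque-of-positions dictionary with repeated descending key sweeps and stale-entry cleanup by a direct greedy that, for each of the n picks, takes the max of the still-feasible window slice and advances past its first occurrence; per-bank score built by Horner instead of positional powers of 10.
import Mathlib
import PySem

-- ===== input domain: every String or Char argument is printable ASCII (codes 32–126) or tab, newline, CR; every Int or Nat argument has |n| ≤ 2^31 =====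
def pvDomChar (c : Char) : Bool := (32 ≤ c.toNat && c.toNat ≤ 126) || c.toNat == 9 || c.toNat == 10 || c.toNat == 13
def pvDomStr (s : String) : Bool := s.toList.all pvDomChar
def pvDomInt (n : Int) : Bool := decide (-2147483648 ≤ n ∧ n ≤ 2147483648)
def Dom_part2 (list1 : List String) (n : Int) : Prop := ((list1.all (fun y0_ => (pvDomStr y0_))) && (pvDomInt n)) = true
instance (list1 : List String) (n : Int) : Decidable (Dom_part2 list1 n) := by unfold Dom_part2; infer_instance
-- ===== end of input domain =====

-- B replaces A's digit->deque-of-positions dictionary and its descending key sweeps by a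
-- direct greedy over window slices (max of the still-feasible window, advance past its
-- first occurrence), with the score built by Horner's rule: shorter and plainer ("simpler").

-- ===== PORT A =====

-- int(bank[i]) on a one-character string; the .getD 0 is unreachable under Pre_part2
-- (Python raises ValueError on a non-digit character, which Pre_part2 excludes)
def pyDigit (c : Char) : Int := (PySem.Int.ofStr? (String.singleton c)).getD 0

-- while count_positions[key] and count_positions[key][0] <= current_index: popleft()
def cleanKey (q : List Int) (cur : Int) : List Int :=
  match q with
  | [] => []
  | p :: rest => if p ≤ cur then cleanKey rest cur else p :: rest

-- the 'for key in sorted(count_positions.keys(), reverse=True)' loop body, threading the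
-- mutated dict; returns (dict, none) on fall-through and (dict, some (key, p)) at the break
def scanKeys (cp : PySem.Dict Int (List Int)) (keys : List Int) (n l_result length cur : Int) :
    PySem.Dict Int (List Int) × Option (Int × Int) :=
  match keys with
  | [] => (cp, none)
  | key :: rest =>
    let q := cleanKey (cp.getD key []) cur
    let cp1 := cp.insert key q
    match q with
    | [] => scanKeys cp1 rest n l_result length cur
    | p :: qtail =>
      if n - l_result > length - p then scanKeys cp1 rest n l_result length cur
      else (cp1.insert key qtail, some (key, p))

-- the outer 'while len(result) < n' loop; fuel n.toNat suffices: every non-breaking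
-- iteration appends exactly one digit and the guard stops at len(result) = n
def helperLoop (cp : PySem.Dict Int (List Int)) (n length : Int) (result : List Int) (cur : Int) :
    Nat → List Int
  | 0 => result
  | fuel + 1 =>
    if ((result.length : Int)) < n then
      match scanKeys cp (PySem.List.sorted cp.keys (fun k => k) true) n (result.length : Int) length cur with
      | (_, none) => result
      | (cp', some (key, p)) => helperLoop cp' n length (result ++ [key]) p fuel
    else result

-- caclulate_score; 10 ** (n - index - 1): the exponent is ≥ 0 on every call A makes
-- (index < n always holds there), so .toNat is exact
def calcScore (res : List Int) (n : Int) : Int :=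
  (PySem.List.enumerate res 0).foldl (fun score iv => score + iv.2 * (10 : Int) ^ (n - iv.1 - 1).toNat) 0

def helper_function (count_positions : PySem.Dict Int (List Int)) (n length : Int) : Int :=
  calcScore (helperLoop count_positions n length [] (-1) n.toNat) n

-- for i in range(l): int_i = int(bank[i]); if int_i not in cp: cp[int_i] = deque(); cp[int_i].append(i)
def buildCP (cs : List Char) : PySem.Dict Int (List Int) :=
  (PySem.List.pyRange 0 (cs.length : Int) 1).foldl
    (fun cp i =>
      let int_i := pyDigit (PySem.List.pyGetD cs i ' ')
      let cp1 := if cp.contains int_i then cp else cp.insert int_i []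
      cp1.modify int_i [] (fun q => q ++ [i]))
    PySem.Dict.empty

def part2 (list1 : List String) (n : Int) : Int :=
  list1.foldl (fun result bank =>
    result + helper_function (buildCP bank.toList) n (bank.toList.length : Int)) 0

-- ===== PORT B =====

-- the 'for k in range(n)' loop of Source B over state (start, value);
-- max() of the window: the 'none' branch is unreachable (the window is nonempty
-- for every k once n ≤ l, which the caller's guard ensures)
def bankValue (digits : List Int) (l n : Int) : Int :=
  ((PySem.List.pyRange 0 n 1).foldl
    (fun (sv : Int × Int) k =>
      let window := PySem.List.slice digits (some sv.1) (some (l - n + k + 1))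
      match PySem.List.max? window (fun d => d) with
      | some d => (sv.1 + (((PySem.List.index? window d).getD 0 : Nat) : Int) + 1, sv.2 * 10 + d)
      | none => sv)
    (0, 0)).2

def part2_alt (list1 : List String) (n : Int) : Int :=
  list1.foldl (fun total bank =>
    let digits := bank.toList.map (fun c => pyDigit c)
    if (bank.toList.length : Int) < n then total
    else total + bankValue digits (bank.toList.length : Int) n) 0

-- ===== PRECONDITION & SPEC =====
-- Pre_part2: every character of every bank is an ASCII digit — exactly the inputs on which
-- Python A returns normally (int(bank[i]) raises ValueError on any other character)
def Pre_part2 (list1 : List String) (n : Int) : Prop :=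
  (list1.all (fun s => s.toList.all (fun c => c.isDigit))) = true
instance (list1 : List String) (n : Int) : Decidable (Pre_part2 list1 n) := by
  unfold Pre_part2; infer_instance

def pvWitness_part2 : List String × Int := (["31753", "92"], 3)

def Spec_part2 (list1 : List String) (n : Int) (out : Int) : Prop := out = part2_alt list1 n
instance (list1 : List String) (n : Int) (out : Int) : Decidable (Spec_part2 list1 n out) := by
  unfold Spec_part2; infer_instance

-- ===== CLAIM (what is proved, stated in full; the proofs are below) =====
def Claim_equal_part2 : Prop := ∀ (list1 : List String) (n : Int), Dom_part2 list1 n → Pre_part2 list1 n → Spec_part2 list1 n (part2 list1 n)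

-- ===== LEMMAS AND PROOFS =====

-- positions (as Python ints) of value v in ds, in increasing order
def posl (ds : List Int) (v : Int) : List Int :=
  ((PySem.List.enumerate ds 0).filter (fun q => q.2 == v)).map (·.1)

-- "digit v has a position usable for pick number j": some position after cur leaving enough room
def okb (ds : List Int) (n l cur j v : Int) : Bool :=
  (posl ds v).any (fun p => decide (cur < p ∧ n - j ≤ l - p))

-- the distinct digits of ds, largest first (what sorted(cp.keys(), reverse=True) yields)
def keyList (ds : List Int) : List Int :=
  PySem.List.sorted (PySem.List.dedup ds) (fun x => x) true

-- first position of v after cur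
def minp (ds : List Int) (cur v : Int) : Int :=
  ((posl ds v).filter (fun p => decide (cur < p))).headD 0

-- the common greedy skeleton both loops implement
def G (ds : List Int) (n l : Int) : Int → Int → Nat → List Int
  | _, _, 0 => []
  | cur, j, fuel+1 =>
    match (keyList ds).find? (fun v => okb ds n l cur j v) with
    | none => []
    | some v => v :: G ds n l (minp ds cur v) (j+1) fuel

-- dict-state invariant of A's loop: keys are exactly the digits of ds (no duplicates), and
-- each stored deque is a suffix of that digit's position list missing only positions ≤ cur
def DInv (ds : List Int) (cp : PySem.Dict Int (List Int)) (cur : Int) : Prop :=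
  cp.keys.Nodup ∧ (∀ v, v ∈ cp.keys ↔ v ∈ ds) ∧
  ∀ v ∈ ds, ∃ t, posl ds v = t ++ cp.getD v [] ∧ ∀ p ∈ t, p ≤ cur

lemma posl_pairwise (ds : List Int) (v : Int) : (posl ds v).Pairwise (· < ·) := by
  unfold posl
  rw [List.pairwise_map]
  exact List.Pairwise.filter _ (PySem.List.pairwise_lt_enumerate ds 0)

lemma mem_posl (ds : List Int) (v p : Int) :
    p ∈ posl ds v ↔ ∃ (k : ℕ) (h : k < ds.length), p = (k : Int) ∧ ds[k] = v := by
  unfold posl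
  simp only [List.mem_map, List.mem_filter, PySem.List.mem_enumerate_iff]
  constructor
  · rintro ⟨q, ⟨⟨k, hk, rfl⟩, hv⟩, rfl⟩
    simp only [beq_iff_eq] at hv
    exact ⟨k, hk, by simpa using hv⟩
  · rintro ⟨k, hk, rfl, hv⟩
    exact ⟨((k : Int), ds[k]), ⟨⟨k, hk, by simp⟩, by simpa using hv⟩, rfl⟩

lemma cleanKey_eq_filter (q : List Int) (cur : Int) (hq : q.Pairwise (· < ·)) :
    cleanKey q cur = q.filter (fun p => decide (cur < p)) := by
  induction q with
  | nil => rfl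
  | cons p rest ih =>
    rcases List.pairwise_cons.mp hq with ⟨hall, hrest⟩
    by_cases hp : p ≤ cur
    · have : decide (cur < p) = false := by simp; omega
      simp only [cleanKey, hp, if_true, List.filter_cons, this]
      exact ih hrest
    · have hcp : decide (cur < p) = true := by simp; omega
      simp only [cleanKey, hp, if_false, List.filter_cons, hcp, if_true]
      rw [List.filter_eq_self.mpr]
      intro x hx
      simp only [decide_eq_true_eq]
      exact lt_trans (by omega) (hall x hx)

lemma okb_iff (ds : List Int) (n l cur j v : Int) :
    okb ds n l cur j v = true ↔ ∃ p ∈ posl ds v, cur < p ∧ n - j ≤ l - p := by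
  simp [okb, List.any_eq_true]

lemma minp_spec (ds : List Int) (cur v : Int) (h : ∃ p ∈ posl ds v, cur < p) :
    minp ds cur v ∈ posl ds v ∧ cur < minp ds cur v ∧
      ∀ q ∈ posl ds v, cur < q → minp ds cur v ≤ q := by
  rcases h with ⟨p, hp, hcp⟩
  have hpF : p ∈ (posl ds v).filter (fun p => decide (cur < p)) :=
    List.mem_filter.mpr ⟨hp, by simpa using hcp⟩
  have hpw : ((posl ds v).filter (fun p => decide (cur < p))).Pairwise (· < ·) :=
    List.Pairwise.filter _ (posl_pairwise ds v)
  rcases hF : (posl ds v).filter (fun p => decide (cur < p)) with _ | ⟨hd, tl⟩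
  · rw [hF] at hpF; simp at hpF
  · have hminp : minp ds cur v = hd := by unfold minp; rw [hF]; rfl
    rw [hF] at hpF hpw
    have hhd : hd ∈ (posl ds v).filter (fun p => decide (cur < p)) := by rw [hF]; simp
    rcases List.mem_filter.mp hhd with ⟨hmem, hlt⟩
    refine ⟨hminp ▸ hmem, hminp ▸ (by simpa using hlt), ?_⟩
    intro q hq hcq
    have hqF : q ∈ hd :: tl := by
      rw [← hF]; exact List.mem_filter.mpr ⟨hq, by simpa using hcq⟩
    rw [hminp]
    rcases List.mem_cons.mp hqF with rfl | hqtl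
    · exact le_refl _
    · exact le_of_lt ((List.pairwise_cons.mp hpw).1 q hqtl)

lemma filter_split (L : List Int) (cur : Int) (hL : L.Pairwise (· < ·)) :
    L = L.filter (fun p => decide (p ≤ cur)) ++ L.filter (fun p => decide (cur < p)) := by
  induction L with
  | nil => rfl
  | cons a rest ih =>
    rcases List.pairwise_cons.mp hL with ⟨hall, hrest⟩
    by_cases ha : a ≤ cur
    · have h1 : decide (a ≤ cur) = true := by simpa using ha
      have h2 : decide (cur < a) = false := by simp; omega
      simp only [List.filter_cons, h1, h2, if_true, Bool.false_eq_true, if_false, List.cons_append]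
      exact congrArg (a :: ·) (ih hrest)
    · have h1 : decide (a ≤ cur) = false := by simpa using ha
      have h2 : decide (cur < a) = true := by simp; omega
      simp only [List.filter_cons, h1, h2, if_true, Bool.false_eq_true, if_false]
      have hf1 : rest.filter (fun p => decide (p ≤ cur)) = [] := by
        rw [List.filter_eq_nil_iff]
        intro p hp
        have := hall p hp
        simp; omega
      have hf2 : rest.filter (fun p => decide (cur < p)) = rest := by
        rw [List.filter_eq_self]
        intro p hp
        have := hall p hp
        simp; omega
      rw [hf1, hf2, List.nil_append]

lemma clean_getD (ds : List Int) (cp : PySem.Dict Int (List Int)) (cur key : Int)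
    (hkd : key ∈ ds) (hInv : DInv ds cp cur) :
    cleanKey (cp.getD key []) cur = (posl ds key).filter (fun p => decide (cur < p)) := by
  obtain ⟨-, -, hsuf⟩ := hInv
  obtain ⟨t, ht, htle⟩ := hsuf key hkd
  have hq : (cp.getD key []).Pairwise (· < ·) := by
    have := posl_pairwise ds key
    rw [ht] at this
    exact this.sublist (List.sublist_append_right t _)
  rw [cleanKey_eq_filter _ _ hq, ht, List.filter_append]
  have hf1 : t.filter (fun p => decide (cur < p)) = [] := by
    rw [List.filter_eq_nil_iff]
    intro p hp
    have := htle p hp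
    simp; omega
  rw [hf1, List.nil_append]

lemma inv_insert_clean (ds : List Int) (cp : PySem.Dict Int (List Int)) (cur key : Int)
    (hkd : key ∈ ds) (hInv : DInv ds cp cur) :
    DInv ds (cp.insert key ((posl ds key).filter (fun p => decide (cur < p)))) cur := by
  obtain ⟨hnd, hmem, hsuf⟩ := hInv
  refine ⟨PySem.Dict.nodup_keys_insert _ _ _ hnd, ?_, ?_⟩
  · intro v
    rw [PySem.Dict.mem_keys_insert]
    constructor
    · rintro (rfl | hv)
      · exact hkd
      · exact (hmem v).mp hv
    · intro hv
      exact Or.inr ((hmem v).mpr hv)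
  · intro v hv
    by_cases hvk : v = key
    · subst hvk
      rw [PySem.Dict.getD_insert_self]
      refine ⟨(posl ds v).filter (fun p => decide (p ≤ cur)), ?_, ?_⟩
      · exact filter_split _ _ (posl_pairwise ds v)
      · intro p hp
        simpa using (List.mem_filter.mp hp).2
    · rw [PySem.Dict.getD_insert_of_ne _ _ _ hvk]
      exact hsuf v hv

lemma inv_after_pick (ds : List Int) (cp : PySem.Dict Int (List Int)) (cur key p : Int)
    (qtail : List Int) (hkd : key ∈ ds) (hInv : DInv ds cp cur)
    (hqc : (posl ds key).filter (fun x => decide (cur < x)) = p :: qtail) :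
    DInv ds (cp.insert key qtail) p := by
  obtain ⟨hnd, hmem, hsuf⟩ := hInv
  have hcp : cur < p := by
    have : p ∈ (posl ds key).filter (fun x => decide (cur < x)) := by rw [hqc]; simp
    simpa using (List.mem_filter.mp this).2
  refine ⟨PySem.Dict.nodup_keys_insert _ _ _ hnd, ?_, ?_⟩
  · intro v
    rw [PySem.Dict.mem_keys_insert]
    constructor
    · rintro (rfl | hv)
      · exact hkd
      · exact (hmem v).mp hv
    · intro hv
      exact Or.inr ((hmem v).mpr hv)
  · intro v hv
    by_cases hvk : v = key
    · subst hvk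
      rw [PySem.Dict.getD_insert_self]
      refine ⟨(posl ds v).filter (fun x => decide (x ≤ cur)) ++ [p], ?_, ?_⟩
      · rw [List.append_assoc, List.singleton_append, ← hqc]
        exact filter_split _ _ (posl_pairwise ds v)
      · intro x hx
        rcases List.mem_append.mp hx with hx | hx
        · have := (List.mem_filter.mp hx).2
          simp at this; omega
        · simp at hx; omega
    · rw [PySem.Dict.getD_insert_of_ne _ _ _ hvk]
      obtain ⟨t, ht, htle⟩ := hsuf v hv
      exact ⟨t, ht, fun x hx => by have := htle x hx; omega⟩

lemma scanKeys_go (ds : List Int) (n l cur j : Int) :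
    ∀ (keys : List Int) (cp : PySem.Dict Int (List Int)), DInv ds cp cur → (∀ v ∈ keys, v ∈ ds) →
    match keys.find? (fun v => okb ds n l cur j v) with
    | none => ∃ cp', scanKeys cp keys n j l cur = (cp', none)
    | some v => ∃ cp', scanKeys cp keys n j l cur = (cp', some (v, minp ds cur v)) ∧
        DInv ds cp' (minp ds cur v) := by
  intro keys
  induction keys with
  | nil => intro cp hInv _; exact ⟨cp, rfl⟩
  | cons key rest ih =>
    intro cp hInv hmemds
    have hkd : key ∈ ds := hmemds key (by simp)
    have hrest : ∀ v ∈ rest, v ∈ ds := fun v hv => hmemds v (by simp [hv])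
    have hclean := clean_getD ds cp cur key hkd hInv
    have hInv1 := inv_insert_clean ds cp cur key hkd hInv
    rcases hqc : (posl ds key).filter (fun p => decide (cur < p)) with _ | ⟨p, qtail⟩
    · -- deque for key is empty after cleaning: key is skipped
      have hok : okb ds n l cur j key = false := by
        rw [Bool.eq_false_iff]
        intro hok
        rcases (okb_iff ds n l cur j key).mp hok with ⟨p, hp, hcp, -⟩
        have : p ∈ (posl ds key).filter (fun p => decide (cur < p)) :=
          List.mem_filter.mpr ⟨hp, by simpa using hcp⟩
        rw [hqc] at this
        simp at this
      rw [List.find?_cons_of_neg (by simp [hok])]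
      have hrec := ih (cp.insert key ((posl ds key).filter (fun p => decide (cur < p)))) hInv1 hrest
      rw [hqc] at hrec
      have hstep : scanKeys cp (key :: rest) n j l cur =
          scanKeys (cp.insert key []) rest n j l cur := by
        simp only [scanKeys]
        rw [hclean, hqc]
      rw [hstep]
      rw [hqc] at hInv1
      exact hrec
    · have hpmem : p ∈ (posl ds key).filter (fun x => decide (cur < x)) := by rw [hqc]; simp
      rcases List.mem_filter.mp hpmem with ⟨hpd, hpcur⟩
      have hpcur' : cur < p := by simpa using hpcur
      have hpmin : ∀ q ∈ posl ds key, cur < q → p ≤ q := by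
        have hspec := minp_spec ds cur key ⟨p, hpd, hpcur'⟩
        have hm : minp ds cur key = p := by unfold minp; rw [hqc]; rfl
        rw [hm] at hspec
        exact hspec.2.2
      by_cases hskip : n - j > l - p
      · -- not enough room even at the first feasible position: key is skipped
        have hok : okb ds n l cur j key = false := by
          rw [Bool.eq_false_iff]
          intro hok
          rcases (okb_iff ds n l cur j key).mp hok with ⟨q, hq, hcq, hroom⟩
          have := hpmin q hq hcq
          omega
        rw [List.find?_cons_of_neg (by simp [hok])]
        have hrec := ih (cp.insert key ((posl ds key).filter (fun p => decide (cur < p)))) hInv1 hrest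
        have hstep : scanKeys cp (key :: rest) n j l cur =
            scanKeys (cp.insert key (p :: qtail)) rest n j l cur := by
          simp only [scanKeys]
          rw [hclean, hqc]
          simp only [if_pos hskip]
        rw [hstep]
        rw [hqc] at hrec
        exact hrec
      · -- key is picked
        have hok : okb ds n l cur j key = true := by
          rw [okb_iff]
          exact ⟨p, hpd, hpcur', by omega⟩
        rw [List.find?_cons_of_pos (by simp [hok])]
        have hm : minp ds cur key = p := by unfold minp; rw [hqc]; rfl
        refine ⟨cp.insert key qtail, ?_, ?_⟩
        · have hstep : scanKeys cp (key :: rest) n j l cur =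
              ((cp.insert key (p :: qtail)).insert key qtail, some (key, p)) := by
            simp only [scanKeys]
            rw [hclean, hqc]
            simp only [if_neg hskip]
          rw [hstep, PySem.Dict.insert_insert_self, hm]
        · rw [hm]
          exact inv_after_pick ds cp cur key p qtail hkd hInv hqc

lemma find_ok_some (ds : List Int) (n l cur j : Int) (hl : l = (ds.length : Int))
    (hj : j < n) (hcur : -1 ≤ cur) (hcb : cur ≤ l - n + j - 1) :
    ∃ v, (keyList ds).find? (fun v => okb ds n l cur j v) = some v := by
  have h0 : (0 : Int) ≤ cur + 1 := by omega
  have h1 : cur + 1 < (ds.length : Int) := by omega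
  have hk : (cur + 1).toNat < ds.length := by omega
  have hmem : (cur + 1) ∈ posl ds (ds[(cur + 1).toNat]) := by
    rw [mem_posl]
    exact ⟨(cur + 1).toNat, hk, by omega, rfl⟩
  have hok : okb ds n l cur j (ds[(cur + 1).toNat]) = true := by
    rw [okb_iff]
    exact ⟨cur + 1, hmem, by omega, by omega⟩
  have hKmem : ds[(cur + 1).toNat] ∈ keyList ds := by
    unfold keyList
    rw [PySem.List.mem_sorted, PySem.List.mem_dedup]
    exact List.getElem_mem hk
  have := List.find?_isSome.mpr ⟨_, hKmem, hok⟩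
  rcases hfind : (keyList ds).find? (fun v => okb ds n l cur j v) with _ | v
  · rw [hfind] at this; simp at this
  · exact ⟨v, rfl⟩

lemma G_length (ds : List Int) (n l : Int) (hl : l = (ds.length : Int)) :
    ∀ (fuel : Nat) (cur j : Int), j + fuel = n → n ≤ l → -1 ≤ cur → cur ≤ l - n + j - 1 →
    (G ds n l cur j fuel).length = fuel := by
  intro fuel
  induction fuel with
  | zero => intro cur j _ _ _ _; rfl
  | succ fuel ih =>
    intro cur j hjf hnl hcur hcb
    have hj : j < n := by omega
    rcases find_ok_some ds n l cur j hl hj hcur hcb with ⟨v, hv⟩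
    have hok := okb_iff ds n l cur j v |>.mp (List.find?_some hv)
    have hex : ∃ p ∈ posl ds v, cur < p := by
      rcases hok with ⟨p, hp, h1, _⟩; exact ⟨p, hp, h1⟩
    rcases minp_spec ds cur v hex with ⟨hmem, hgt, hmin⟩
    have hble : minp ds cur v ≤ l - n + j := by
      rcases hok with ⟨p, hp, h1, h2⟩
      have := hmin p hp h1
      omega
    unfold G
    rw [hv]
    simp only [List.length_cons]
    rw [ih (minp ds cur v) (j + 1) (by omega) hnl (by omega) (by omega)]

lemma sorted_keys_eq (ds : List Int) (cp : PySem.Dict Int (List Int)) (cur : Int)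
    (h : DInv ds cp cur) : PySem.List.sorted cp.keys (fun k => k) true = keyList ds := by
  obtain ⟨hnd, hmem, -⟩ := h
  have hKperm : (keyList ds).Perm (PySem.List.dedup ds) := PySem.List.sorted_perm _ _ _
  have hKnd : (keyList ds).Nodup := hKperm.symm.nodup (PySem.List.nodup_dedup ds)
  have hKge := PySem.List.sorted_pairwise_rev (PySem.List.dedup ds) (fun x : Int => x)
  have hKgt : (keyList ds).Pairwise (fun a b => b < a) := by
    have hand := List.Pairwise.and hKge hKnd
    exact hand.imp (fun hab => lt_of_le_of_ne hab.1 (Ne.symm hab.2))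
  have hperm2 : (keyList ds).Perm cp.keys := by
    refine hKperm.trans ?_
    rw [List.perm_ext_iff_of_nodup (PySem.List.nodup_dedup ds) hnd]
    intro a; rw [PySem.List.mem_dedup, hmem]
  exact PySem.List.sorted_rev_eq_of_perm_of_pairwise_gt _ _ _ hperm2 hKgt

lemma helperLoop_eq (ds : List Int) (n l : Int) :
    ∀ (fuel : Nat) (cp : PySem.Dict Int (List Int)) (result : List Int) (cur : Int),
    DInv ds cp cur → fuel = (n - (result.length : Int)).toNat →
    helperLoop cp n l result cur fuel = result ++ G ds n l cur (result.length : Int) fuel := by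
  intro fuel
  induction fuel with
  | zero => intro cp result cur _ _; simp [helperLoop, G]
  | succ fuel ih =>
    intro cp result cur hInv hfuel
    have hj : (result.length : Int) < n := by omega
    have hkeys := sorted_keys_eq ds cp cur hInv
    have hmemk : ∀ v ∈ keyList ds, v ∈ ds := by
      intro v hv
      unfold keyList at hv
      rw [PySem.List.mem_sorted, PySem.List.mem_dedup] at hv
      exact hv
    have hgo := scanKeys_go ds n l cur (result.length : Int) (keyList ds) cp hInv hmemk
    simp only [helperLoop, if_pos hj, hkeys]
    rcases hfind : (keyList ds).find? (fun v => okb ds n l cur (result.length : Int) v) with _ | v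
    · rw [hfind] at hgo
      rcases hgo with ⟨cp', heq⟩
      rw [heq]
      unfold G
      rw [hfind, List.append_nil]
    · rw [hfind] at hgo
      rcases hgo with ⟨cp', heq, hInv'⟩
      rw [heq]
      show helperLoop cp' n l (result ++ [v]) (minp ds cur v) fuel = _
      have hlen : (((result ++ [v]).length : Nat) : Int) = (result.length : Int) + 1 := by simp
      have := ih cp' (result ++ [v]) (minp ds cur v) hInv' (by rw [hlen]; omega)
      rw [this, hlen]
      conv_rhs => rw [G]
      rw [hfind]
      simp

lemma pyDigit_space : pyDigit ' ' = 0 := by decide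

lemma step_elim (cp : PySem.Dict Int (List Int)) (v i : Int) :
    (if cp.contains v then cp else cp.insert v []).modify v [] (fun q => q ++ [i])
      = cp.modify v [] (fun q => q ++ [i]) := by
  by_cases h : cp.contains v = true
  · simp [h]
  · simp only [h, Bool.false_eq_true, if_false]
    unfold PySem.Dict.modify
    rw [PySem.Dict.getD_insert_self, PySem.Dict.insert_insert_self,
        PySem.Dict.getD_of_not_contains cp [] (by simpa using h)]

lemma buildCP_eq (cs : List Char) :
    buildCP cs = ((PySem.List.pyRange 0 (cs.length : Int) 1).map
        (fun i => (pyDigit (PySem.List.pyGetD cs i ' '), i))).foldl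
      (fun d p => d.modify p.1 [] (fun q => q ++ [p.2])) PySem.Dict.empty := by
  unfold buildCP
  rw [List.foldl_map]
  refine PySem.List.foldl_congr_mem _ _ _ _ ?_
  intro acc x _
  exact step_elim acc _ x

lemma map_fst_L (cs : List Char) :
    ((PySem.List.pyRange 0 (cs.length : Int) 1).map
        (fun i => (pyDigit (PySem.List.pyGetD cs i ' '), i))).map (·.1) = cs.map pyDigit := by
  have h3 := congrArg (List.map pyDigit) (PySem.List.map_pyGetD_pyRange_zero cs ' ')
  rw [List.map_map] at h3
  simp only [PySem.List.len_eq] at h3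
  rw [List.map_map]
  exact h3

lemma buildCP_getD (cs : List Char) (v : Int) :
    (buildCP cs).getD v [] = posl (cs.map pyDigit) v := by
  rw [buildCP_eq, PySem.Dict.getD_foldl_modify_append, PySem.Dict.getD_empty]
  unfold posl
  rw [PySem.List.enumerate_eq_map_pyRange (cs.map pyDigit) 0]
  simp only [List.filter_map, List.map_map, PySem.List.len_eq, List.length_map, List.nil_append]
  rw [List.filter_congr (p := ((fun p : Int × Int => p.1 == v) ∘ fun i => (pyDigit (PySem.List.pyGetD cs i ' '), i)))
      (q := ((fun q : Int × Int => q.2 == v) ∘ fun j => (j, PySem.List.pyGetD (cs.map pyDigit) j 0)))]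
  · apply List.map_congr_left
    intro x _
    rfl
  · intro x hx
    rcases PySem.List.mem_pyRange_one.mp hx with ⟨h0, h1⟩
    simp only [Function.comp_apply]
    rw [← pyDigit_space, PySem.List.pyGetD_map]

lemma buildCP_inv (cs : List Char) : DInv (cs.map pyDigit) (buildCP cs) (-1) := by
  refine ⟨?_, ?_, ?_⟩
  · rw [buildCP_eq]
    exact PySem.Dict.nodup_keys_foldl_modify_key _ _ _ _ _ PySem.Dict.nodup_keys_empty
  · intro v
    rw [buildCP_eq, PySem.Dict.keys_foldl_modify_key, PySem.Dict.keys_empty]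
    rw [map_fst_L]
    have := PySem.Set.mem_update ([] : PySem.Set Int) (cs.map pyDigit) v
    constructor
    · intro h
      rcases (this.mp h) with h | h
      · simp at h
      · exact h
    · intro h
      exact this.mpr (Or.inr h)
  · intro v _
    exact ⟨[], by simp [buildCP_getD], by simp⟩

lemma calcScore_snoc (res : List Int) (d n : Int) :
    calcScore (res ++ [d]) n = calcScore res n + d * 10 ^ (n - (res.length : Int) - 1).toNat := by
  unfold calcScore
  rw [PySem.List.enumerate_append, List.foldl_append]
  simp

lemma calcScore_horner (res : List Int) (n : Int) (h : (res.length : Int) ≤ n) :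
    calcScore res n = (res.foldl (fun v d => v * 10 + d) 0) * 10 ^ (n - (res.length : Int)).toNat := by
  induction res using List.reverseRecOn with
  | nil => simp [calcScore, PySem.List.enumerate]
  | append_singleton xs d ih =>
      have hlen : ((xs.length : Int)) ≤ n := by simp at h; omega
      rw [calcScore_snoc, ih hlen, List.foldl_append]
      have h1 : (n - (xs.length : Int)).toNat = (n - (xs.length : Int) - 1).toNat + 1 := by
        simp at h; omega
      have h2 : (n - (((xs ++ [d]).length : Nat) : Int)).toNat = (n - (xs.length : Int) - 1).toNat := by
        simp at h ⊢; omega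
      rw [h1, h2, pow_succ]
      simp
      ring

lemma keyList_nodup (ds : List Int) : (keyList ds).Nodup :=
  (PySem.List.sorted_perm _ _ _).symm.nodup (PySem.List.nodup_dedup ds)

lemma keyList_pairwise (ds : List Int) : (keyList ds).Pairwise (fun a b => b < a) := by
  have hKge := PySem.List.sorted_pairwise_rev (PySem.List.dedup ds) (fun x : Int => x)
  have hand := List.Pairwise.and hKge (keyList_nodup ds)
  exact hand.imp (fun hab => lt_of_le_of_ne hab.1 (Ne.symm hab.2))

lemma mem_keyList (ds : List Int) (v : Int) : v ∈ keyList ds ↔ v ∈ ds := by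
  unfold keyList
  rw [PySem.List.mem_sorted, PySem.List.mem_dedup]

lemma find?_first (L : List Int) (pr : Int → Bool) (d : Int) :
    L.Pairwise (fun a b => b < a) → d ∈ L → pr d = true → (∀ y ∈ L, pr y = true → y ≤ d) →
    L.find? pr = some d := by
  induction L with
  | nil => intro _ h; simp at h
  | cons x rest ih =>
    intro hpw hmem hprd hmax
    rcases List.pairwise_cons.mp hpw with ⟨hall, hrest⟩
    rcases List.mem_cons.mp hmem with rfl | hmem
    · exact List.find?_cons_of_pos hprd
    · have hdx : d < x := hall d hmem
      have hprx : ¬ pr x = true := by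
        intro hx
        have := hmax x (by simp) hx
        omega
      rw [List.find?_cons_of_neg hprx]
      exact ih hrest hmem hprd (fun y hy => hmax y (by simp [hy]))

lemma mem_window_iff (ds : List Int) (a t : Nat) (x : Int) :
    x ∈ (ds.drop a).take t ↔ ∃ (i : Nat), a ≤ i ∧ i < a + t ∧ ∃ (h : i < ds.length), ds[i] = x := by
  rw [List.mem_iff_getElem]
  constructor
  · rintro ⟨k, hk, hget⟩
    have hk' : k < t ∧ a + k < ds.length := by
      have := hk
      simp [List.length_take, List.length_drop] at this
      omega
    refine ⟨a + k, by omega, by omega, by omega, ?_⟩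
    rw [List.getElem_take, List.getElem_drop] at hget
    exact hget
  · rintro ⟨i, hai, hit, hilen, hget⟩
    refine ⟨i - a, ?_, ?_⟩
    · simp [List.length_take, List.length_drop]
      omega
    · rw [List.getElem_take, List.getElem_drop]
      have h2 : a + (i - a) = i := by omega
      simp only [h2]
      exact hget

lemma bankValue_eq (ds : List Int) (n l : Int) (hl : l = (ds.length : Int)) :
    ∀ (fuel : Nat) (cur j acc : Int), j + fuel = n → 0 ≤ j → n ≤ l → -1 ≤ cur → cur ≤ l - n + j - 1 →
    ((PySem.List.pyRange j n 1).foldl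
      (fun (sv : Int × Int) k =>
        let window := PySem.List.slice ds (some sv.1) (some (l - n + k + 1))
        match PySem.List.max? window (fun d => d) with
        | some d => (sv.1 + (((PySem.List.index? window d).getD 0 : Nat) : Int) + 1, sv.2 * 10 + d)
        | none => sv)
      (cur + 1, acc)).2
    = (G ds n l cur j fuel).foldl (fun v d => v * 10 + d) acc := by
  intro fuel
  induction fuel with
  | zero =>
    intro cur j acc hjf hj0 hnl hcur hcb
    rw [PySem.List.pyRange_one_eq_nil (by omega)]
    have : G ds n l cur j 0 = [] := rfl
    rw [this]
    rfl
  | succ fuel ih =>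
    intro cur j acc hjf hj0 hnl hcur hcb
    have hjn : j < n := by omega
    have hlen : (ds.length : Int) = l := hl.symm
    have h0a : (0 : Int) ≤ cur + 1 := by omega
    have h0b : (0 : Int) ≤ l - n + j + 1 := by omega
    have haZ : (((cur + 1).toNat : Nat) : Int) = cur + 1 := Int.toNat_of_nonneg h0a
    have hbZ : (((l - n + j + 1).toNat : Nat) : Int) = l - n + j + 1 := Int.toNat_of_nonneg h0b
    have hslice := PySem.List.slice_toNat ds h0a h0b
    set aN : Nat := (cur + 1).toNat with haN
    set tN : Nat := (l - n + j + 1).toNat - (cur + 1).toNat with htN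
    have htZ : ((tN : Nat) : Int) = (l - n + j + 1) - (cur + 1) := by
      rw [htN]; omega
    set win : List Int := (ds.drop aN).take tN with hwin
    have hwin_iff : ∀ x, x ∈ win ↔ okb ds n l cur j x = true := by
      intro x
      rw [hwin, mem_window_iff, okb_iff]
      constructor
      · rintro ⟨i, hai, hit, hilen, hget⟩
        refine ⟨(i : Int), mem_posl ds x (i : Int) |>.mpr ⟨i, hilen, rfl, hget⟩, ?_, ?_⟩ <;> omega
      · rintro ⟨p, hp, hcp, hroom⟩
        rcases (mem_posl ds x p).mp hp with ⟨k, hk, rfl, hget⟩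
        exact ⟨k, by omega, by omega, hk, hget⟩
    have ha_lt : aN < ds.length := by omega
    have hx0 : ds[aN] ∈ win := by
      rw [hwin, mem_window_iff]
      exact ⟨aN, le_refl _, by omega, ha_lt, rfl⟩
    obtain ⟨d, hd⟩ : ∃ d, PySem.List.max? win (fun d => d) = some d := by
      rcases hmo : PySem.List.max? win (fun d => d) with _ | d
      · rw [PySem.List.max?_eq_none_iff] at hmo
        rw [hmo] at hx0
        simp at hx0
      · exact ⟨d, rfl⟩
    have hdmem : d ∈ win := PySem.List.max?_mem hd
    have hdmax : ∀ y ∈ win, y ≤ d := fun y hy => PySem.List.max?_isMax hd y hy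
    have hdds : d ∈ ds := by
      rcases (mem_window_iff ds aN tN d).mp (hwin ▸ hdmem) with ⟨i, -, -, hilen, hget⟩
      exact hget ▸ List.getElem_mem hilen
    have hfind : (keyList ds).find? (fun v => okb ds n l cur j v) = some d := by
      refine find?_first _ _ _ (keyList_pairwise ds) ((mem_keyList ds d).mpr hdds)
        ((hwin_iff d).mp hdmem) ?_
      intro y _ hok
      exact hdmax y ((hwin_iff y).mpr hok)
    obtain ⟨i0, hi0⟩ : ∃ i0, PySem.List.index? win d = some i0 := by
      have := (PySem.List.index?_isSome_iff win d).mpr hdmem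
      rcases hio : PySem.List.index? win d with _ | i0
      · rw [hio] at this; simp at this
      · exact ⟨i0, rfl⟩
    rcases PySem.List.getElem_of_index?_eq_some hi0 with ⟨hki0, hwd, hmini0⟩
    have hwinlen : win.length = tN := by
      rw [hwin]
      simp [List.length_take, List.length_drop]
      omega
    have hgetwin : ∀ (k : Nat) (hk : k < win.length), win[k] = ds[aN + k]'(by rw [hwinlen] at hk; omega) := by
      intro k hk
      simp only [hwin, List.getElem_take, List.getElem_drop]
    have hex : ∃ p ∈ posl ds d, cur < p := by
      rcases (okb_iff ds n l cur j d).mp ((hwin_iff d).mp hdmem) with ⟨p, hp, hcp, -⟩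
      exact ⟨p, hp, hcp⟩
    rcases minp_spec ds cur d hex with ⟨hmmem, hmgt, hmmin⟩
    have hp0mem : ((aN + i0 : Nat) : Int) ∈ posl ds d := by
      rw [mem_posl]
      refine ⟨aN + i0, by omega, rfl, ?_⟩
      rw [← hgetwin i0 hki0]
      exact hwd
    have hm_le : minp ds cur d ≤ ((aN + i0 : Nat) : Int) := hmmin _ hp0mem (by push_cast; omega)
    have hm_eq : minp ds cur d = (cur + 1) + (i0 : Int) := by
      by_contra hne
      have hmlt : minp ds cur d < ((aN + i0 : Nat) : Int) := by
        push_cast at hm_le ⊢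
        omega
      rcases (mem_posl ds d _).mp hmmem with ⟨km, hkm, hkmeq, hgetm⟩
      have hkm_ge : aN ≤ km := by omega
      have hkm_lt : km - aN < i0 := by omega
      have : win[km - aN]'(by omega) = d := by
        rw [hgetwin (km - aN) (by omega)]
        have h2 : aN + (km - aN) = km := by omega
        simp only [h2]
        exact hgetm
      exact (hmini0 (km - aN) hkm_lt) this
    have hm_ub : minp ds cur d ≤ l - n + j := by
      have : ((aN + i0 : Nat) : Int) < l - n + j + 1 := by
        have := hki0
        rw [hwinlen] at this
        push_cast
        omega
      omega
    rw [PySem.List.pyRange_one_cons hjn, List.foldl_cons]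
    simp only [hslice, hd, hi0, Option.getD_some]
    rw [← hm_eq]
    have hG : G ds n l cur j (fuel + 1) = d :: G ds n l (minp ds cur d) (j + 1) fuel := by
      conv_lhs => rw [G]
      rw [hfind]
    rw [hG, List.foldl_cons]
    exact ih (minp ds cur d) (j + 1) (acc * 10 + d) (by omega) (by omega) hnl (by omega) (by omega)

lemma bank_eq (cs : List Char) (n : Int) :
    helper_function (buildCP cs) n (cs.length : Int) =
      (if (cs.length : Int) < n then 0 else bankValue (cs.map pyDigit) (cs.length : Int) n) := by
  set ds : List Int := cs.map pyDigit with hds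
  set l : Int := (cs.length : Int) with hlcs
  have hl : l = (ds.length : Int) := by rw [hds, hlcs]; simp
  have hl0 : 0 ≤ l := by rw [hlcs]; positivity
  have hA : helper_function (buildCP cs) n l = calcScore (G ds n l (-1) 0 n.toNat) n := by
    unfold helper_function
    rw [helperLoop_eq ds n l n.toNat (buildCP cs) [] (-1) (buildCP_inv cs) (by simp)]
    simp
  rw [hA]
  by_cases hn0 : n ≤ 0
  · have hfuel : n.toNat = 0 := by omega
    rw [hfuel]
    have hG0 : G ds n l (-1) 0 0 = [] := rfl
    rw [hG0]
    have hnl : ¬ (l < n) := by omega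
    rw [if_neg hnl]
    unfold bankValue
    rw [PySem.List.pyRange_one_eq_nil (by omega)]
    rfl
  · rcases Nat.exists_eq_add_of_lt (show 0 < n.toNat by omega) with ⟨fuel, hfuel⟩
    by_cases hln : l < n
    · rw [if_pos hln]
      have hnone : (keyList ds).find? (fun v => okb ds n l (-1) 0 v) = none := by
        rw [List.find?_eq_none]
        intro v _ hok
        rcases (okb_iff ds n l (-1) 0 v).mp hok with ⟨p, hp, -, hroom⟩
        rcases (mem_posl ds v p).mp hp with ⟨k, hk, rfl, -⟩
        have : (k : Int) < l := by rw [hl]; exact_mod_cast hk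
        omega
      rw [show n.toNat = fuel + 1 by omega]
      have hGnil : G ds n l (-1) 0 (fuel + 1) = [] := by
        conv_lhs => rw [G]
        rw [hnone]
      rw [hGnil]
      rfl
    · rw [if_neg hln]
      have hlen := G_length ds n l hl n.toNat (-1) 0 (by omega) (by omega) (by omega) (by omega)
      rw [calcScore_horner _ _ (by rw [hlen]; omega)]
      have hzero : (n - ((G ds n l (-1) 0 n.toNat).length : Int)).toNat = 0 := by
        rw [hlen]; omega
      rw [hzero, pow_zero, mul_one]
      unfold bankValue
      rw [show ((0 : Int), (0 : Int)) = ((-1 : Int) + 1, (0 : Int)) by norm_num]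
      rw [bankValue_eq ds n l hl n.toNat (-1) 0 0 (by omega) (by omega) (by omega) (by omega) (by omega)]

lemma part2_total (list1 : List String) (n : Int) : part2 list1 n = part2_alt list1 n := by
  unfold part2 part2_alt
  induction list1 using List.reverseRecOn with
  | nil => rfl
  | append_singleton xs x ih =>
      simp only [List.foldl_append, List.foldl_cons, List.foldl_nil, ih]
      rw [bank_eq x.toList n]
      split_ifs <;> simp

-- ===== VERDICT (by name: the statement is the Claim_ definition above) =====
theorem part2_spec : Claim_equal_part2 := by
  intro list1 n _ _
  unfold Spec_part2
  exact part2_total list1 n
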